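-- pv_equiv track=rewrite | github.com/s4146247/WIL_Project_Group_80 | app.py | truncate_context_by_chars
-- ===== SOURCE A (Python) =====
-- def truncate_context_by_chars(context: str, max_chars: int = 1200) -> str:
--     """
--     Keep as many full context blocks (separated by the delimiter) as will fit
--     into max_chars. If none fit, return the first max_chars characters.
--     """
--     delimiter = "\n\n---\n\n"
--     if len(context) <= max_chars:
--         return context
--     parts = context.split(delimiter)
--     out_parts = []
--     cur_len = 0
--     for p in parts:
--         add_len = len(p) + len(delimiter)
--         if cur_len + add_len > max_chars:
--             break
--         out_parts.append(p)
--         cur_len += add_len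
--     if out_parts:
--         return delimiter.join(out_parts)
--     # nothing fits as a full block, fall back to hard truncation
--     return context[:max_chars]
-- ===== SOURCE B (Python) =====
-- def truncate_context_by_chars(context: str, max_chars: int = 1200) -> str:
--     """
--     Prefix-sum formulation: tabulate the cumulative cost of keeping the first
--     i blocks (each block charged a full delimiter), then the cutoff k is the
--     number of cumulative sums that fit in max_chars (valid because the sums
--     are strictly increasing). Join the first k blocks, or hard-truncate.
--     """
--     delimiter = "\n\n---\n\n"
--     if len(context) <= max_chars:
--         return context
--     parts = context.split(delimiter)
--     sums = []
--     total = 0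
--     for p in parts:
--         total += len(p) + len(delimiter)
--         sums.append(total)
--     k = sum(1 for s in sums if s <= max_chars)
--     if k == 0:
--         return context[:max_chars]
--     return delimiter.join(parts[:k])
-- ===== Notes on version B (the rewrite author's own statement) =====
-- stated objective: alternative
-- what changed: Replaces the greedy accumulate-and-break loop over blocks with a prefix-sum table: cumulative per-block costs are tabulated in one pass, the cutoff k is the count of cumulative sums that fit (valid since the sums are strictly increasing), and the answer is the join of the first k blocks.
import Mathlib
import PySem

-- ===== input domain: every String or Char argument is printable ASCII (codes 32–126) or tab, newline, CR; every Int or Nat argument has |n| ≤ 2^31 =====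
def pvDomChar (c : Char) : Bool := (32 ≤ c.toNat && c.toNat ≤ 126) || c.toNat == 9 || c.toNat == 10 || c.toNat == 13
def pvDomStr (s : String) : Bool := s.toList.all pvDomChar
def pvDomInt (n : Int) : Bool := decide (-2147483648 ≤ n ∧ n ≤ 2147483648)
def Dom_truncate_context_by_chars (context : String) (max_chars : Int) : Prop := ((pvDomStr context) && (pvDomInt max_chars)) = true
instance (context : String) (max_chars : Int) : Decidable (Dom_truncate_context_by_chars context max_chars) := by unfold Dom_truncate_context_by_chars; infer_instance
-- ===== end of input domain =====

-- B replaces A's greedy accumulate-and-break loop by a prefix-sum table plus a count of fitting sums (alternative decomposition, same cost).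

-- ===== PORT A =====
def pvDelim : String := "\n\n---\n\n"

-- context.split(delimiter): split? never returns none for a nonempty separator
def pvSplit (s : String) : List String := (PySem.Str.split? s pvDelim).getD []

-- the for-loop of A: out_parts / cur_len accumulator with break
def pvALoop (maxc : Int) : List String → List String → Int → List String
  | [], out, _ => out
  | p :: rest, out, cur =>
    if cur + (PySem.Str.len p + PySem.Str.len pvDelim) > maxc then out
    else pvALoop maxc rest (out ++ [p]) (cur + (PySem.Str.len p + PySem.Str.len pvDelim))

def truncate_context_by_chars (context : String) (max_chars : Int) : String :=
  if PySem.Str.len context ≤ max_chars then context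
  else
    let parts := pvSplit context
    let out_parts := pvALoop max_chars parts [] 0
    if out_parts.isEmpty then PySem.Str.slice context none (some max_chars)
    else PySem.Str.join pvDelim out_parts

-- ===== PORT B =====
def truncate_context_by_chars_alt (context : String) (max_chars : Int) : String :=
  if PySem.Str.len context ≤ max_chars then context
  else
    let parts := pvSplit context
    -- one pass building the prefix-sum table (sums, total)
    let st := parts.foldl (fun (st : List Int × Int) p =>
        let total := st.2 + (PySem.Str.len p + PySem.Str.len pvDelim)
        (st.1 ++ [total], total)) ([], 0)
    let k := st.1.countP (fun s => s ≤ max_chars)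
    if k = 0 then PySem.Str.slice context none (some max_chars)
    else PySem.Str.join pvDelim (PySem.List.slice parts none (some (k : Int)))

-- ===== PRECONDITION & SPEC =====
def Spec_truncate_context_by_chars (context : String) (max_chars : Int) (out : String) : Prop := out = truncate_context_by_chars_alt context max_chars
instance (context : String) (max_chars : Int) (out : String) : Decidable (Spec_truncate_context_by_chars context max_chars out) := by unfold Spec_truncate_context_by_chars; infer_instance

-- ===== CLAIM (what is proved, stated in full; the proofs are below) =====
def Claim_equal_truncate_context_by_chars : Prop := ∀ (context : String) (max_chars : Int), Dom_truncate_context_by_chars context max_chars → Spec_truncate_context_by_chars context max_chars (truncate_context_by_chars context max_chars)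

-- ===== LEMMAS AND PROOFS =====

-- the number of blocks A's greedy loop keeps
def pvG (maxc : Int) : List String → Int → Nat
  | [], _ => 0
  | p :: rest, cur =>
    if cur + (PySem.Str.len p + PySem.Str.len pvDelim) > maxc then 0
    else pvG maxc rest (cur + (PySem.Str.len p + PySem.Str.len pvDelim)) + 1

-- the prefix-sum list B tabulates, with arbitrary starting total
def pvSums : List String → Int → List Int
  | [], _ => []
  | p :: rest, tot => (tot + (PySem.Str.len p + PySem.Str.len pvDelim)) ::
      pvSums rest (tot + (PySem.Str.len p + PySem.Str.len pvDelim))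

theorem pvALoop_eq_take (maxc : Int) (parts : List String) :
    ∀ out cur, pvALoop maxc parts out cur = out ++ parts.take (pvG maxc parts cur) := by
  induction parts with
  | nil => intro out cur; simp [pvALoop, pvG]
  | cons p rest ih =>
    intro out cur
    simp only [pvALoop, pvG]
    split_ifs with h
    · simp
    · simp [ih]

theorem pvFoldl_fst (parts : List String) :
    ∀ (acc : List Int) (tot : Int),
      (parts.foldl (fun (st : List Int × Int) p =>
        let total := st.2 + (PySem.Str.len p + PySem.Str.len pvDelim)
        (st.1 ++ [total], total)) (acc, tot)).1
      = acc ++ pvSums parts tot := by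
  induction parts with
  | nil => intro acc tot; simp [pvSums]
  | cons p rest ih =>
    intro acc tot
    simp only [List.foldl_cons]
    rw [ih]
    simp [pvSums]

theorem pvSums_gt (parts : List String) : ∀ tot, ∀ x ∈ pvSums parts tot, tot < x := by
  induction parts with
  | nil => intro tot x hx; simp [pvSums] at hx
  | cons p rest ih =>
    intro tot x hx
    have hlen : (0:Int) ≤ PySem.Str.len p := by simp [PySem.Str.len_eq]
    have hd : (0:Int) < PySem.Str.len pvDelim := by decide
    simp only [pvSums, List.mem_cons] at hx
    rcases hx with rfl | hx
    · omega
    · have := ih _ x hx; omega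

theorem pvCount_eq_G (maxc : Int) (parts : List String) :
    ∀ cur, (pvSums parts cur).countP (fun s => s ≤ maxc) = pvG maxc parts cur := by
  induction parts with
  | nil => intro cur; simp [pvSums, pvG]
  | cons p rest ih =>
    intro cur
    by_cases hf : cur + (PySem.Str.len p + PySem.Str.len pvDelim) ≤ maxc
    · have h1 : ¬ (cur + (PySem.Str.len p + PySem.Str.len pvDelim) > maxc) := by omega
      simp at hf h1
      simp [pvSums, pvG, List.countP_cons, hf, h1, ih]
    · have h1 : cur + (PySem.Str.len p + PySem.Str.len pvDelim) > maxc := by omega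
      have hz : (pvSums rest (cur + (PySem.Str.len p + PySem.Str.len pvDelim))).countP
          (fun s => decide (s ≤ maxc)) = 0 := by
        rw [List.countP_eq_zero]
        intro x hx
        have := pvSums_gt rest _ x hx
        simp only [decide_eq_true_eq]
        omega
      simp at hf h1 hz
      simp [pvSums, pvG, List.countP_cons, hf, h1]
      exact hz

theorem pvG_le_length (maxc : Int) (parts : List String) :
    ∀ cur, pvG maxc parts cur ≤ parts.length := by
  induction parts with
  | nil => intro cur; simp [pvG]
  | cons p rest ih =>
    intro cur
    simp only [pvG, List.length_cons]
    split_ifs with h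
    · omega
    · have := ih (cur + (PySem.Str.len p + PySem.Str.len pvDelim)); omega

-- ===== VERDICT (by name: the statement is the Claim_ definition above) =====
theorem truncate_context_by_chars_spec : Claim_equal_truncate_context_by_chars := by
  intro context max_chars _
  unfold Spec_truncate_context_by_chars truncate_context_by_chars truncate_context_by_chars_alt
  by_cases hg : PySem.Str.len context ≤ max_chars
  · rw [if_pos hg, if_pos hg]
  · rw [if_neg hg, if_neg hg]
    simp only [pvALoop_eq_take, pvFoldl_fst, pvCount_eq_G, List.nil_append]
    set parts := pvSplit context with hparts
    set g := pvG max_chars parts 0 with hgdef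
    by_cases hk : g = 0
    · simp [hk]
    · have hle := pvG_le_length max_chars parts 0
      rw [← hgdef] at hle
      have hpne : parts ≠ [] := by
        intro hnil
        rw [hnil] at hle
        simp at hle
        exact hk hle
      have hne : parts.take g ≠ [] := by
        simp [List.take_eq_nil_iff, hk, hpne]
      rw [PySem.List.slice_to_natCast]
      simp [hk, hne]
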